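-- pv_equiv track=rewrite | github.com/atf-inc/dec25_intern_E_security | worker/semantic.py | is_content_consumption
-- ===== SOURCE A (Python) =====
-- INFORMATIONAL_DOMAINS = [
--     "nytimes.com", "wsj.com", "reuters.com", "bloomberg.com", "cnn.com", "bbc.com",
--     "wikipedia.org", "britannica.com", "stackoverflow.com", "github.com",
--     "google.com", "bing.com", "duckduckgo.com"
-- ]
--
-- INFORMATIONAL_PATH_PATTERNS = [
--     "/docs", "/wiki", "/manual", "/guide", "/help", "/faq"
-- ]
--
-- SEARCH_PATTERNS = ["/search", "/q/", "?q=", "?query="]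
--
-- def is_content_consumption(domain: str, url: str = "") -> bool:
--     """Detect read-only informational access"""
--     if not domain:
--         return False
--
--     lower_domain = domain.lower()
--
--     if any(lower_domain == d or lower_domain.endswith("." + d)
--            for d in INFORMATIONAL_DOMAINS):
--         return True
--
--     if not url:
--         return False
--
--     lower_url = url.lower()
--
--     if any(pattern in lower_url for pattern in SEARCH_PATTERNS):
--         return True
--
--     if any(pattern in lower_url for pattern in INFORMATIONAL_PATH_PATTERNS):
--         return True
--
--     return False
-- ===== SOURCE B (Python) =====
-- INFORMATIONAL_DOMAINS = [
--     "nytimes.com", "wsj.com", "reuters.com", "bloomberg.com", "cnn.com", "bbc.com",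
--     "wikipedia.org", "britannica.com", "stackoverflow.com", "github.com",
--     "google.com", "bing.com", "duckduckgo.com"
-- ]
--
-- INFORMATIONAL_PATH_PATTERNS = [
--     "/docs", "/wiki", "/manual", "/guide", "/help", "/faq"
-- ]
--
-- SEARCH_PATTERNS = ["/search", "/q/", "?q=", "?query="]
--
--
-- def is_content_consumption(domain: str, url: str = "") -> bool:
--     """Detect read-only informational access (suffix-enumeration with a set lookup)."""
--     if not domain:
--         return False
--
--     s = domain.lower()
--     dset = set(INFORMATIONAL_DOMAINS)
--
--     if s in dset:
--         return True
--     for j, c in enumerate(s):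
--         if c == '.' and s[j + 1:] in dset:
--             return True
--
--     if not url:
--         return False
--
--     u = url.lower()
--     return any(p in u for p in SEARCH_PATTERNS + INFORMATIONAL_PATH_PATTERNS)
-- ===== Notes on version B (the rewrite author's own statement) =====
-- stated objective: alternative
-- what changed: Instead of scanning the 13 known domains and testing each for equality or being a dot-preceded suffix, B enumerates the dot-aligned suffixes of the input domain once and looks each up in a set built from INFORMATIONAL_DOMAINS; the two trailing url-pattern scans are merged into one any over the concatenated pattern lists.
import Mathlib
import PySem

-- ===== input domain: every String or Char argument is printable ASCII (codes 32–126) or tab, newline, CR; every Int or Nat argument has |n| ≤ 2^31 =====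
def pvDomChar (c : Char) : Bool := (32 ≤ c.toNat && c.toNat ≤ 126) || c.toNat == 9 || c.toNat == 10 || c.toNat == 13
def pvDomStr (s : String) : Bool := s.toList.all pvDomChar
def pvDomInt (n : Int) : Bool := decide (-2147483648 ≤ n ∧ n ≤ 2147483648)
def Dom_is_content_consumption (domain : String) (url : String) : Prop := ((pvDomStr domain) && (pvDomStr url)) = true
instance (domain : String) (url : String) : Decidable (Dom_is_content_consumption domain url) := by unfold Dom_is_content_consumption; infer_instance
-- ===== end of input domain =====

-- B replaces A's scan over the 13 known domains (==/endswith per domain) by enumerating the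
-- dot-aligned suffixes of the input once and looking each up in a set; same results, alternative structure.


-- shared module-level constants (as lists of chars)
def pvInfoDomains : List (List Char) :=
  ["nytimes.com".toList, "wsj.com".toList, "reuters.com".toList, "bloomberg.com".toList,
   "cnn.com".toList, "bbc.com".toList, "wikipedia.org".toList, "britannica.com".toList,
   "stackoverflow.com".toList, "github.com".toList, "google.com".toList, "bing.com".toList,
   "duckduckgo.com".toList]

def pvPathPatterns : List (List Char) :=
  ["/docs".toList, "/wiki".toList, "/manual".toList, "/guide".toList, "/help".toList, "/faq".toList]

def pvSearchPatterns : List (List Char) :=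
  ["/search".toList, "/q/".toList, "?q=".toList, "?query=".toList]

-- ===== PORT A =====
def is_content_consumption (domain : String) (url : String) : Bool :=
  if domain.toList.isEmpty then false
  else
    let lower_domain := PySem.Chars.lower domain.toList
    if pvInfoDomains.any (fun d => lower_domain == d || PySem.Chars.endswith lower_domain ('.' :: d)) then
      true
    else if url.toList.isEmpty then false
    else
      let lower_url := PySem.Chars.lower url.toList
      if pvSearchPatterns.any (fun pattern => PySem.Chars.isIn pattern lower_url) then true
      else if pvPathPatterns.any (fun pattern => PySem.Chars.isIn pattern lower_url) then true
      else false

-- ===== PORT B =====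
-- the 'for j, c in enumerate(s): if c == "." and s[j+1:] in dset' loop of Source B
def pvSuffixHit (dset : PySem.Set (List Char)) : List Char → Bool
  | [] => false
  | c :: rest => (c == '.' && dset.contains rest) || pvSuffixHit dset rest

def is_content_consumption_alt (domain : String) (url : String) : Bool :=
  if domain.toList.isEmpty then false
  else
    let s := PySem.Chars.lower domain.toList
    let dset := PySem.Set.ofList pvInfoDomains
    if dset.contains s then true
    else if pvSuffixHit dset s then true
    else if url.toList.isEmpty then false
    else
      let u := PySem.Chars.lower url.toList
      (pvSearchPatterns ++ pvPathPatterns).any (fun p => PySem.Chars.isIn p u)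

-- ===== PRECONDITION & SPEC =====
def Spec_is_content_consumption (domain : String) (url : String) (out : Bool) : Prop := out = is_content_consumption_alt domain url
instance (domain : String) (url : String) (out : Bool) : Decidable (Spec_is_content_consumption domain url out) := by unfold Spec_is_content_consumption; infer_instance

-- ===== CLAIM (what is proved, stated in full; the proofs are below) =====
def Claim_equal_is_content_consumption : Prop := ∀ (domain : String) (url : String), Dom_is_content_consumption domain url → Spec_is_content_consumption domain url (is_content_consumption domain url)

-- ===== LEMMAS AND PROOFS =====

-- B's suffix scan hits iff some listed domain is a dot-preceded suffix of s
theorem pvSuffixHit_iff (D : PySem.Set (List Char)) (s : List Char) :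
    pvSuffixHit D s = true ↔ ∃ d ∈ (D : List (List Char)), ('.' :: d) <:+ s := by
  induction s with
  | nil => simp [pvSuffixHit]
  | cons c rest ih =>
    simp only [pvSuffixHit, Bool.or_eq_true, Bool.and_eq_true, beq_iff_eq, ih,
      List.suffix_cons_iff, List.cons.injEq, PySem.Set.contains, List.contains_eq_mem, decide_eq_true_eq]
    constructor
    · rintro (⟨h1, h2⟩ | ⟨d, hd, h⟩)
      · exact ⟨rest, by simpa using h2, Or.inl ⟨h1.symm, rfl⟩⟩
      · exact ⟨d, hd, Or.inr h⟩
    · rintro ⟨d, hd, ⟨h1, h2⟩ | h⟩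
      · exact Or.inl ⟨h1.symm, by simpa [h2] using hd⟩
      · exact Or.inr ⟨d, hd, h⟩

-- the domain checks of A and B agree
theorem domain_check_eq (s : List Char) :
    pvInfoDomains.any (fun d => s == d || PySem.Chars.endswith s ('.' :: d)) =
      ((PySem.Set.ofList pvInfoDomains).contains s || pvSuffixHit (PySem.Set.ofList pvInfoDomains) s) := by
  rw [Bool.eq_iff_iff]
  simp only [List.any_eq_true, Bool.or_eq_true, beq_iff_eq, PySem.Chars.endswith_iff,
    pvSuffixHit_iff, PySem.Set.contains, List.contains_eq_mem, decide_eq_true_eq, PySem.Set.mem_ofList]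
  constructor
  · rintro ⟨d, hd, h | h⟩
    · exact Or.inl (h ▸ hd)
    · exact Or.inr ⟨d, hd, h⟩
  · rintro (h | ⟨d, hd, h⟩)
    · exact ⟨s, h, Or.inl rfl⟩
    · exact ⟨d, hd, Or.inr h⟩

-- ===== VERDICT (by name: the statement is the Claim_ definition above) =====
theorem is_content_consumption_spec : Claim_equal_is_content_consumption := by
  intro domain url _
  unfold Spec_is_content_consumption is_content_consumption is_content_consumption_alt
  by_cases h0 : domain.toList.isEmpty
  · simp [h0]
  · simp only [h0, if_false, Bool.false_eq_true]
    rw [domain_check_eq (PySem.Chars.lower domain.toList)]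
    rw [Bool.eq_iff_iff]
    by_cases h3 : url.toList.isEmpty <;>
      simp [h3, List.any_append, or_assoc]
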